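-- pv_equiv track=rewrite | github.com/smpn9malang/PsychologicalScreening | api/resources/screening_tools.py | calculate_dass42_subscales
-- ===== SOURCE A (Python) =====
-- def calculate_dass42_subscales(answers, questions):
--     """Calculate subscale scores for DASS-42"""
--     depression_score = 0
--     anxiety_score = 0
--     stress_score = 0
--
--     # Match answers with question categories
--     for i, (answer, question) in enumerate(zip(answers, questions)):
--         category = question.get('category', '').lower() if isinstance(question, dict) else ''
--         score = answer if isinstance(answer, int) else 0
--
--         if 'depression' in category:
--             depression_score += score
--         elif 'anxiety' in category:
--             anxiety_score += score
--         elif 'stress' in category: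
--             stress_score += score
--
--     return {
--         "depression": depression_score,
--         "anxiety": anxiety_score,
--         "stress": stress_score
--     }
-- ===== SOURCE B (Python) =====
-- def calculate_dass42_subscales(answers, questions):
--     """Calculate subscale scores for DASS-42.
--
--     Table-driven: classify each question once to a subscale label (first
--     matching keyword, in priority order), then aggregate scores per label
--     in a group-by-key comprehension.
--     """
--     keys = ("depression", "anxiety", "stress")
--
--     def label(q):
--         cat = q.get('category', '').lower() if isinstance(q, dict) else ''
--         return next((k for k in keys if k in cat), None)
--
--     labeled = [(label(q), a if isinstance(a, int) else 0)
--                for a, q in zip(answers, questions)]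
--     return {k: sum(s for l, s in labeled if l == k) for k in keys}
-- ===== Notes on version B (the rewrite author's own statement) =====
-- stated objective: alternative
-- what changed: Replaces the elif chain over three mutable counters with a table-driven classifier (first matching keyword from a priority tuple via next/find) that labels every question once, followed by a group-by-label aggregation comprehension.
import Mathlib
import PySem

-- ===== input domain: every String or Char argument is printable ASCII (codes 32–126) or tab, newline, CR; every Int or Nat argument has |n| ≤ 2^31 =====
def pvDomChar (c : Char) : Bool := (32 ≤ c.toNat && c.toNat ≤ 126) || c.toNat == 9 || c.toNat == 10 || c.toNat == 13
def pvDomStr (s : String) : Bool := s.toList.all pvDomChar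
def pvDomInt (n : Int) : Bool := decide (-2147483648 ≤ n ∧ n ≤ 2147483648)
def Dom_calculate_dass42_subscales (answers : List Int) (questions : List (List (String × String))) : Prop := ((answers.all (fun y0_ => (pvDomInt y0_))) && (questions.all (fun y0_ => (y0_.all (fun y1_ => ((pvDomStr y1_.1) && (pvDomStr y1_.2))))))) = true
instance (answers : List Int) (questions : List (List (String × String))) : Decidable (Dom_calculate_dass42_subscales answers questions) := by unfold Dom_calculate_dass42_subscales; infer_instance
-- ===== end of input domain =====

-- B replaces A's elif chain over three mutable counters with a table-driven
-- classifier (first matching keyword) plus group-by-label aggregation; same O(n) cost (objective: alternative).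


-- ===== PORT A =====
-- literal transliteration of A: one loop over zip(answers, questions) updating three counters with an elif chain
def calculate_dass42_subscales (answers : List Int) (questions : List (List (String × String))) : List (String × Int) :=
  let r := (answers.zip questions).foldl
    (fun (st : Int × Int × Int) p =>
      let category := PySem.Str.lower (PySem.Dict.getD (PySem.Dict.mk p.2) "category" "")
      let score := p.1
      if PySem.Str.isIn "depression" category then (st.1 + score, st.2.1, st.2.2)
      else if PySem.Str.isIn "anxiety" category then (st.1, st.2.1 + score, st.2.2)
      else if PySem.Str.isIn "stress" category then (st.1, st.2.1, st.2.2 + score)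
      else st)
    (0, 0, 0)
  [("depression", r.1), ("anxiety", r.2.1), ("stress", r.2.2)]

-- ===== PORT B =====
-- B's priority table of subscale keys
def pvKeys : List String := ["depression", "anxiety", "stress"]

-- B's label(q): first key of the table occurring in q.get('category','').lower(), else None
def pvLabel (q : List (String × String)) : Option String :=
  pvKeys.find? (fun k => PySem.Str.isIn k (PySem.Str.lower (PySem.Dict.getD (PySem.Dict.mk q) "category" "")))

-- transliteration of B: label every pair once, then group-by-label aggregation
def calculate_dass42_subscales_alt (answers : List Int) (questions : List (List (String × String))) : List (String × Int) :=
  let labeled := (answers.zip questions).map (fun p => (pvLabel p.2, p.1))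
  pvKeys.map (fun k => (k, ((labeled.filter (fun x => x.1 == some k)).map (fun x => x.2)).sum))

-- ===== PRECONDITION & SPEC =====
def Spec_calculate_dass42_subscales (answers : List Int) (questions : List (List (String × String))) (out : List (String × Int)) : Prop := out = calculate_dass42_subscales_alt answers questions
instance (answers : List Int) (questions : List (List (String × String))) (out : List (String × Int)) : Decidable (Spec_calculate_dass42_subscales answers questions out) := by unfold Spec_calculate_dass42_subscales; infer_instance

-- ===== CLAIM (what is proved, stated in full; the proofs are below) =====
def Claim_equal_calculate_dass42_subscales : Prop := ∀ (answers : List Int) (questions : List (List (String × String))), Dom_calculate_dass42_subscales answers questions → Spec_calculate_dass42_subscales answers questions (calculate_dass42_subscales answers questions)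

-- ===== LEMMAS AND PROOFS =====

-- sum of B's scores carrying label k over a labeled list
def pvSumFor (l : List (Int × List (String × String))) (k : String) : Int :=
  (((l.map (fun p => (pvLabel p.2, p.1))).filter (fun x => x.1 == some k)).map (fun x => x.2)).sum


-- category string of a question, as both programs compute it
def pvCatOf (q : List (String × String)) : String :=
  PySem.Str.lower (PySem.Dict.getD (PySem.Dict.mk q) "category" "")

theorem pvLabel_dep (q : List (String × String))
    (h1 : PySem.Str.isIn "depression" (pvCatOf q) = true) :
    pvLabel q = some "depression" := by
  unfold pvLabel pvKeys
  exact List.find?_cons_of_pos h1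

theorem pvLabel_anx (q : List (String × String))
    (h1 : PySem.Str.isIn "depression" (pvCatOf q) = false)
    (h2 : PySem.Str.isIn "anxiety" (pvCatOf q) = true) :
    pvLabel q = some "anxiety" := by
  unfold pvLabel pvKeys
  rw [List.find?_cons_of_neg (by simp [pvCatOf] at h1; simp [h1])]
  exact List.find?_cons_of_pos h2

theorem pvLabel_str (q : List (String × String))
    (h1 : PySem.Str.isIn "depression" (pvCatOf q) = false)
    (h2 : PySem.Str.isIn "anxiety" (pvCatOf q) = false)
    (h3 : PySem.Str.isIn "stress" (pvCatOf q) = true) :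
    pvLabel q = some "stress" := by
  unfold pvLabel pvKeys
  rw [List.find?_cons_of_neg (by simp [pvCatOf] at h1; simp [h1]),
      List.find?_cons_of_neg (by simp [pvCatOf] at h2; simp [h2])]
  exact List.find?_cons_of_pos h3

theorem pvLabel_none (q : List (String × String))
    (h1 : PySem.Str.isIn "depression" (pvCatOf q) = false)
    (h2 : PySem.Str.isIn "anxiety" (pvCatOf q) = false)
    (h3 : PySem.Str.isIn "stress" (pvCatOf q) = false) :
    pvLabel q = none := by
  unfold pvLabel pvKeys
  rw [List.find?_cons_of_neg (by simp [pvCatOf] at h1; simp [h1]),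
      List.find?_cons_of_neg (by simp [pvCatOf] at h2; simp [h2]),
      List.find?_cons_of_neg (by simp [pvCatOf] at h3; simp [h3])]
  rfl

theorem pvSumFor_cons (hd : Int × List (String × String))
    (tl : List (Int × List (String × String))) (k : String) :
    pvSumFor (hd :: tl) k
      = (if pvLabel hd.2 == some k then hd.1 else 0) + pvSumFor tl k := by
  unfold pvSumFor
  simp only [List.map_cons, List.filter_cons]
  by_cases h : (pvLabel hd.2 == some k) = true
  · simp [h]
  · simp [h]

-- A's fold starting from (d, a, s) adds exactly B's per-label sums.
theorem pv_fold_eq (l : List (Int × List (String × String))) (d a s : Int) :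
    l.foldl
      (fun (st : Int × Int × Int) p =>
        let category := PySem.Str.lower (PySem.Dict.getD (PySem.Dict.mk p.2) "category" "")
        let score := p.1
        if PySem.Str.isIn "depression" category then (st.1 + score, st.2.1, st.2.2)
        else if PySem.Str.isIn "anxiety" category then (st.1, st.2.1 + score, st.2.2)
        else if PySem.Str.isIn "stress" category then (st.1, st.2.1, st.2.2 + score)
        else st)
      (d, a, s)
    = (d + pvSumFor l "depression", a + pvSumFor l "anxiety", s + pvSumFor l "stress") := by
  induction l generalizing d a s with
  | nil => simp [pvSumFor]
  | cons hd tl ih =>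
    simp only [List.foldl_cons]
    cases h1 : PySem.Str.isIn "depression" (pvCatOf hd.2) with
    | true =>
      show _ = _
      rw [show (PySem.Str.lower (PySem.Dict.getD (PySem.Dict.mk hd.2) "category" "")) = pvCatOf hd.2 from rfl]
      simp only [h1, if_true, ih, pvSumFor_cons, pvLabel_dep hd.2 h1]
      simp [add_assoc]
    | false =>
      rw [show (PySem.Str.lower (PySem.Dict.getD (PySem.Dict.mk hd.2) "category" "")) = pvCatOf hd.2 from rfl]
      simp only [h1, Bool.false_eq_true, if_false]
      cases h2 : PySem.Str.isIn "anxiety" (pvCatOf hd.2) with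
      | true =>
        simp only [if_true, ih, pvSumFor_cons, pvLabel_anx hd.2 h1 h2]
        simp [add_assoc]
      | false =>
        simp only [Bool.false_eq_true, if_false]
        cases h3 : PySem.Str.isIn "stress" (pvCatOf hd.2) with
        | true =>
          simp only [if_true, ih, pvSumFor_cons, pvLabel_str hd.2 h1 h2 h3]
          simp [add_assoc]
        | false =>
          simp only [Bool.false_eq_true, if_false, ih, pvSumFor_cons,
            pvLabel_none hd.2 h1 h2 h3]
          simp

-- ===== VERDICT (by name: the statement is the Claim_ definition above) =====
theorem calculate_dass42_subscales_spec : Claim_equal_calculate_dass42_subscales := by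
  intro answers questions _
  unfold Spec_calculate_dass42_subscales calculate_dass42_subscales calculate_dass42_subscales_alt
  simp only [pv_fold_eq, zero_add, pvKeys, List.map_cons, List.map_nil, pvSumFor]
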